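-- pv_equiv track=rewrite | github.com/Stephen-O-Donovan/adventOfCodePython | 06/sols.py | findStart
-- ===== SOURCE A (Python) =====
-- def findStart(code: str)-> int:
--     currentSq = []
--     for (i,v) in enumerate(code):
--         if(i<3):
--             continue
--         for j in range(-3,1):
--             e = code[(j+i)]
--             if(e not in currentSq):
--                 currentSq.append(e)
--         if(len(currentSq)==4):
--             return i+1
--         else:
--             currentSq = []
-- ===== SOURCE B (Python) =====
-- def findStart(code: str) -> int:
--     # Last-occurrence algorithm: keep, for each character, the index of its
--     # most recent occurrence, and `start`, the beginning of the longest
--     # duplicate-free run ending at the current position.  The first position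
--     # where that run reaches length 4 gives the answer; no window is ever
--     # re-examined.
--     last = {}
--     start = 0
--     for i, ch in enumerate(code):
--         j = last.get(ch, -1)
--         if j >= start:
--             start = j + 1
--         last[ch] = i
--         if i - start >= 3:
--             return i + 1
--     return None
-- ===== Notes on version B (the rewrite author's own statement) =====
-- stated objective: alternative
-- what changed: B uses the classic last-occurrence algorithm: a dict of each character's most recent index plus a `start` pointer to the longest duplicate-free run ending at the current position, returning when that run reaches length 4 -- no 4-character window is ever materialised or tested for distinctness, unlike A's per-position rebuild of a distinct list.
import Mathlib
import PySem

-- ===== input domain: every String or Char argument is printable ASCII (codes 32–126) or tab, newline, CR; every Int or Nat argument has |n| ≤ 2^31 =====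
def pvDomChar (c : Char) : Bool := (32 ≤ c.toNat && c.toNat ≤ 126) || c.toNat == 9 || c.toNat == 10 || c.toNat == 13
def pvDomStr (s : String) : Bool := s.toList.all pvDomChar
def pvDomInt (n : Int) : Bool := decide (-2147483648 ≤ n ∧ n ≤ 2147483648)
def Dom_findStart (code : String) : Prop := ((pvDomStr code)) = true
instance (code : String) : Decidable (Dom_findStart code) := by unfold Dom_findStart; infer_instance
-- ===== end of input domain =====

-- B replaces A's per-position distinct-window test by the last-occurrence algorithm
-- (dict of most recent index per char + start of the duplicate-free run); alternative, same O(n).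

-- ===== PORT A =====
-- A's inner j-loop: build the distinct list of the window ending at index i
def findStartSq (l : List Char) (i : Int) : List Char :=
  (PySem.List.pyRange (-3) 1 1).foldl (fun acc j =>
    match PySem.List.pyGet? l (j + i) with
    | some e => if acc.contains e then acc else acc ++ [e]
    | none => acc) []   -- `none` never occurs: for i ≥ 3 reached by the loop, j+i ∈ [0, len)

-- A's outer loop: `rest` is the not-yet-visited suffix, `i` the enumerate counter
def findStartGoA (l : List Char) (i : Nat) (rest : List Char) : Option Int :=
  match rest with
  | [] => none
  | _ :: rest' =>
    if i < 3 then findStartGoA l (i + 1) rest'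
    else if (findStartSq l (i : Int)).length == 4 then some ((i : Int) + 1)
    else findStartGoA l (i + 1) rest'

def findStart (code : String) : Option Int :=
  findStartGoA code.toList 0 code.toList

-- ===== PORT B =====
-- Source B's for-loop: `lastD` is the dict of most recent occurrence indices,
-- `start` the beginning of the duplicate-free run ending just before index i
def findStartGoB (lastD : PySem.Dict Char Int) (start : Int) (i : Nat) (rest : List Char) : Option Int :=
  match rest with
  | [] => none
  | ch :: rest' =>
    let j := lastD.getD ch (-1)
    let start' := if j ≥ start then j + 1 else start
    let lastD' := lastD.insert ch (i : Int)
    if (i : Int) - start' ≥ 3 then some ((i : Int) + 1)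
    else findStartGoB lastD' start' (i + 1) rest'

def findStart_alt (code : String) : Option Int :=
  findStartGoB PySem.Dict.empty 0 0 code.toList

-- ===== PRECONDITION & SPEC =====
def Spec_findStart (code : String) (out : Option Int) : Prop := out = findStart_alt code
instance (code : String) (out : Option Int) : Decidable (Spec_findStart code out) := by unfold Spec_findStart; infer_instance

-- ===== CLAIM (what is proved, stated in full; the proofs are below) =====
def Claim_equal_findStart : Prop := ∀ (code : String), Dom_findStart code → Spec_findStart code (findStart code)

-- ===== LEMMAS AND PROOFS =====

-- index of the last occurrence of c in pre, or -1
def lastIdx : List Char → Char → Int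
  | [], _ => -1
  | ch :: t, c =>
    let r := lastIdx t c
    if r ≥ 0 then r + 1 else if c = ch then 0 else -1

theorem lastIdx_ge (pre : List Char) (c : Char) : -1 ≤ lastIdx pre c := by
  induction pre with
  | nil => simp [lastIdx]
  | cons ch t ih =>
    simp only [lastIdx]
    split_ifs <;> omega

theorem lastIdx_lt (pre : List Char) (c : Char) : lastIdx pre c < (pre.length : Int) := by
  induction pre with
  | nil => simp [lastIdx]
  | cons ch t ih =>
    simp only [lastIdx, List.length_cons]
    split_ifs <;> push_cast <;> omega

theorem le_lastIdx_iff (pre : List Char) (c : Char) (s : Nat) :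
    (s : Int) ≤ lastIdx pre c ↔ c ∈ pre.drop s := by
  induction pre generalizing s with
  | nil => simp [lastIdx]; omega
  | cons ch t ih =>
    cases s with
    | zero =>
      simp only [List.drop_zero, List.mem_cons, lastIdx, Nat.cast_zero]
      have h0 := ih 0
      have hge := lastIdx_ge t c
      simp only [List.drop_zero, Nat.cast_zero] at h0
      split_ifs with h1 h2
      · constructor
        · intro _; right; exact h0.mp h1
        · intro _; omega
      · subst h2; constructor
        · intro _; left; rfl
        · intro _; omega
      · constructor
        · intro h; omega
        · intro h; rcases h with h | h
          · exact absurd h h2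
          · exact absurd (h0.mpr h) h1
    | succ s' =>
      simp only [List.drop_succ_cons, lastIdx]
      have h0 := ih s'
      have hge := lastIdx_ge t c
      split_ifs with h1 h2
      · rw [← h0]; push_cast; omega
      · rw [← h0]
        constructor
        · intro h; push_cast at h; omega
        · intro h; omega
      · rw [← h0]
        constructor
        · intro h; push_cast at h; omega
        · intro h; omega

theorem lastIdx_append (pre : List Char) (ch c : Char) :
    lastIdx (pre ++ [ch]) c = if c = ch then (pre.length : Int) else lastIdx pre c := by
  induction pre with
  | nil => simp [lastIdx]
  | cons x t ih =>
    simp only [List.cons_append, lastIdx, ih, List.length_cons]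
    have hge := lastIdx_ge t c
    by_cases hc : c = ch
    · simp only [if_pos hc]
      rw [if_pos (by positivity)]
      push_cast; ring
    · simp only [if_neg hc]

-- duplicate-freedom of a suffix is monotone in the start index
theorem nodup_drop_mono (pre : List Char) (s s' : Nat) (h : s ≤ s')
    (hn : (pre.drop s).Nodup) : (pre.drop s').Nodup := by
  have : pre.drop s' = (pre.drop s).drop (s' - s) := by
    rw [List.drop_drop]; congr 1; omega
  rw [this]
  exact List.Nodup.sublist (List.drop_sublist _ _) hn

theorem drop_append_single (pre : List Char) (ch : Char) (s : Nat) (h : s ≤ pre.length) :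
    (pre ++ [ch]).drop s = pre.drop s ++ [ch] :=
  List.drop_append_of_le_length h

theorem nodup_append_single (xs : List Char) (ch : Char) :
    (xs ++ [ch]).Nodup ↔ xs.Nodup ∧ ch ∉ xs := by
  simp [List.nodup_append]
  exact fun _ => ⟨fun h hm => h ch hm rfl, fun h a ha he => h (he ▸ ha)⟩

-- A's window check at index m+3 equals the six pairwise comparisons
set_option maxHeartbeats 800000 in
theorem findStartSq_len (l : List Char) (m : Nat) (a b c d : Char) (rest : List Char)
    (h : l.drop m = a :: b :: c :: d :: rest) :
    ((findStartSq l ((m + 3 : Nat) : Int)).length == 4)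
      = (a != b && a != c && a != d && b != c && b != d && c != d) := by
  have h0 : l[m]? = some a := by
    have := List.getElem?_drop (xs := l) (i := m) (j := 0)
    rw [h] at this; simpa using this.symm
  have h1 : l[m+1]? = some b := by
    have := List.getElem?_drop (xs := l) (i := m) (j := 1)
    rw [h] at this; simpa using this.symm
  have h2 : l[m+2]? = some c := by
    have := List.getElem?_drop (xs := l) (i := m) (j := 2)
    rw [h] at this; simpa using this.symm
  have h3 : l[m+3]? = some d := by
    have := List.getElem?_drop (xs := l) (i := m) (j := 3)
    rw [h] at this; simpa using this.symm
  have e0 : PySem.List.pyGet? l (-3 + ((m + 3 : Nat) : Int)) = some a := by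
    have heq : (-3 + ((m + 3 : Nat) : Int)) = ((m : Nat) : Int) := by push_cast; ring
    rw [heq, PySem.List.pyGet?_natCast, h0]
  have e1 : PySem.List.pyGet? l (-2 + ((m + 3 : Nat) : Int)) = some b := by
    have heq : (-2 + ((m + 3 : Nat) : Int)) = (((m + 1 : Nat)) : Int) := by push_cast; ring
    rw [heq, PySem.List.pyGet?_natCast, h1]
  have e2 : PySem.List.pyGet? l (-1 + ((m + 3 : Nat) : Int)) = some c := by
    have heq : (-1 + ((m + 3 : Nat) : Int)) = (((m + 2 : Nat)) : Int) := by push_cast; ring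
    rw [heq, PySem.List.pyGet?_natCast, h2]
  have e3 : PySem.List.pyGet? l (0 + ((m + 3 : Nat) : Int)) = some d := by
    have heq : (0 + ((m + 3 : Nat) : Int)) = (((m + 3 : Nat)) : Int) := by push_cast; ring
    rw [heq, PySem.List.pyGet?_natCast, h3]
  have hr : PySem.List.pyRange (-3) 1 1 = [-3, -2, -1, 0] := by decide
  rw [findStartSq, hr]
  simp only [List.foldl, e0, e1, e2, e3]
  simp only [List.contains_eq_mem, List.nil_append, decide_eq_true_eq]
  split_ifs with h1 h2 h3 h4 h5 h6 h7 h8 h9 h10 h11 h12 h13 h14 <;>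
    simp_all [List.mem_cons, bne_iff_ne, not_or] <;> tauto

theorem pairwise_iff_nodup (a b c d : Char) :
    (a != b && a != c && a != d && b != c && b != d && c != d) = true ↔
      ([a, b, c, d] : List Char).Nodup := by
  simp [List.nodup_cons, bne_iff_ne, and_assoc]

theorem goA_cons (l : List Char) (i : Nat) (y : Char) (ys : List Char) :
    findStartGoA l i (y :: ys)
      = if i < 3 then findStartGoA l (i + 1) ys
        else if (findStartSq l (i : Int)).length == 4 then some ((i : Int) + 1)
        else findStartGoA l (i + 1) ys := rfl

theorem goB_cons (lastD : PySem.Dict Char Int) (start : Int) (i : Nat) (ch : Char) (rest' : List Char) :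
    findStartGoB lastD start i (ch :: rest')
      = (let j := lastD.getD ch (-1)
         let start' := if j ≥ start then j + 1 else start
         let lastD' := lastD.insert ch (i : Int)
         if (i : Int) - start' ≥ 3 then some ((i : Int) + 1)
         else findStartGoB lastD' start' (i + 1) rest') := rfl

theorem exists_four_chars (xs : List Char) (h : 4 ≤ xs.length) :
    ∃ a b c d r, xs = a :: b :: c :: d :: r := by
  match xs, h with
  | a :: b :: c :: d :: r, _ => exact ⟨a, b, c, d, r, rfl⟩

-- main loop correspondence: B's (lastD, start) is characterised by lastIdx and minimal-start
theorem goA_eq_goB (l : List Char) :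
    ∀ (rest : List Char) (i : Nat) (lastD : PySem.Dict Char Int) (start : Nat),
    l.drop i = rest → start ≤ i →
    (∀ c, lastD.getD c (-1) = lastIdx (l.take i) c) →
    ((l.take i).drop start).Nodup →
    (∀ s : Nat, s < start → ¬ ((l.take i).drop s).Nodup) →
    findStartGoA l i rest = findStartGoB lastD (start : Int) i rest := by
  intro rest
  induction rest with
  | nil => intro i lastD start _ _ _ _ _; rfl
  | cons ch rest' ih =>
    intro i lastD start hdrop hsi hlastInv hnd hmin
    -- basic facts about position i
    have hilen : i < l.length := by
      by_contra h
      rw [List.drop_eq_nil_of_le (by omega)] at hdrop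
      simp at hdrop
    have hgetl : l[i]? = some ch := by
      have := List.getElem?_drop (xs := l) (i := i) (j := 0)
      rw [hdrop] at this; simpa using this.symm
    have hprelen : (l.take i).length = i := by simp; omega
    have htakesucc : l.take (i + 1) = l.take i ++ [ch] := by
      rw [List.take_add_one, hgetl]; rfl
    set pre := l.take i with hpre
    -- B's step values
    have hj : lastD.getD ch (-1) = lastIdx pre ch := hlastInv ch
    have hjlt : lastIdx pre ch < (i : Int) := by
      have := lastIdx_lt pre ch; omega
    have hjge : -1 ≤ lastIdx pre ch := lastIdx_ge pre ch
    -- the updated dict satisfies the invariant at i+1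
    have hlastInv' : ∀ c, (lastD.insert ch (i : Int)).getD c (-1) = lastIdx (l.take (i + 1)) c := by
      intro c
      rw [htakesucc, lastIdx_append, PySem.Dict.getD_insert]
      by_cases hc : c = ch
      · simp [hc, hprelen]
      · simp [hc, hlastInv c]
    -- case split on B's start update
    by_cases hcase : lastIdx pre ch ≥ (start : Int)
    · -- duplicate inside the run: start moves to lastIdx+1
      obtain ⟨jn, hjn⟩ : ∃ jn : Nat, lastIdx pre ch = (jn : Int) := by
        refine ⟨(lastIdx pre ch).toNat, ?_⟩
        omega
      have hjni : jn < i := by omega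
      have hstart' : (if lastD.getD ch (-1) ≥ (start : Int) then lastD.getD ch (-1) + 1 else (start : Int))
          = ((jn + 1 : Nat) : Int) := by
        rw [hj, if_pos hcase, hjn]; push_cast; ring
      -- new invariants at i+1 with start = jn+1
      have hnd' : ((l.take (i + 1)).drop (jn + 1)).Nodup := by
        rw [htakesucc, drop_append_single pre ch _ (by omega), nodup_append_single]
        constructor
        · exact nodup_drop_mono pre start (jn + 1) (by omega) hnd
        · rw [← le_lastIdx_iff]; omega
      have hmin' : ∀ s : Nat, s < jn + 1 → ¬ ((l.take (i + 1)).drop s).Nodup := by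
        intro s hs
        rw [htakesucc, drop_append_single pre ch _ (by omega), nodup_append_single]
        intro ⟨_, hmem⟩
        exact hmem ((le_lastIdx_iff pre ch s).mp (by omega))
      -- evaluate both sides
      rw [goA_cons, goB_cons]
      simp only [hstart']
      by_cases hi3 : i < 3
      · rw [if_pos hi3, if_neg (by push_cast; omega)]
        exact ih (i + 1) _ (jn + 1) (by rw [← List.drop_drop, hdrop]; rfl) (by omega)
          hlastInv' hnd' hmin'
      · rw [if_neg hi3]
        -- extract the 4-char window ending at i
        have hm : i - 3 + 3 = i := by omega
        have hlen4 : 4 ≤ (l.drop (i - 3)).length := by simp; omega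
        obtain ⟨a, b, c0, d, rest2, hwin⟩ := exists_four_chars (l.drop (i - 3)) hlen4
        have hseg : (l.take (i + 1)).drop (i - 3) = [a, b, c0, d] := by
          rw [List.drop_take, hwin]
          have : i + 1 - (i - 3) = 4 := by omega
          rw [this]; rfl
        have hcond := findStartSq_len l (i - 3) a b c0 d rest2 hwin
        rw [hm] at hcond
        rw [hcond]
        -- A's condition ↔ start' ≤ i - 3 ↔ B's condition
        by_cases hAc : (a != b && a != c0 && a != d && b != c0 && b != d && c0 != d) = true
        · have hnodupw : ((l.take (i + 1)).drop (i - 3)).Nodup := by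
            rw [hseg]; exact (pairwise_iff_nodup a b c0 d).mp hAc
          have hle : jn + 1 ≤ i - 3 := by
            by_contra hlt
            exact hmin' (i - 3) (by omega) hnodupw
          rw [if_pos hAc, if_pos (by push_cast; omega)]
        · have hgt : ¬ ((i : Int) - ((jn + 1 : Nat) : Int) ≥ 3) := by
            intro hge
            have : jn + 1 ≤ i - 3 := by push_cast at hge; omega
            have := nodup_drop_mono (l.take (i + 1)) (jn + 1) (i - 3) this hnd'
            rw [hseg] at this
            exact hAc ((pairwise_iff_nodup a b c0 d).mpr this)
          rw [if_neg hAc, if_neg hgt]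
          exact ih (i + 1) _ (jn + 1) (by rw [← List.drop_drop, hdrop]; rfl) (by omega)
            hlastInv' hnd' hmin'
    · -- no duplicate inside the run: start unchanged
      have hstart' : (if lastD.getD ch (-1) ≥ (start : Int) then lastD.getD ch (-1) + 1 else (start : Int))
          = ((start : Nat) : Int) := by
        rw [hj, if_neg hcase]
      have hnd' : ((l.take (i + 1)).drop start).Nodup := by
        rw [htakesucc, drop_append_single pre ch _ (by omega), nodup_append_single]
        refine ⟨hnd, ?_⟩
        rw [← le_lastIdx_iff]; omega
      have hmin' : ∀ s : Nat, s < start → ¬ ((l.take (i + 1)).drop s).Nodup := by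
        intro s hs
        rw [htakesucc, drop_append_single pre ch _ (by omega), nodup_append_single]
        intro ⟨hnds, _⟩
        exact hmin s hs hnds
      rw [goA_cons, goB_cons]
      simp only [hstart']
      by_cases hi3 : i < 3
      · rw [if_pos hi3, if_neg (by omega)]
        exact ih (i + 1) _ start (by rw [← List.drop_drop, hdrop]; rfl) (by omega)
          hlastInv' hnd' hmin'
      · rw [if_neg hi3]
        have hm : i - 3 + 3 = i := by omega
        have hlen4 : 4 ≤ (l.drop (i - 3)).length := by simp; omega
        obtain ⟨a, b, c0, d, rest2, hwin⟩ := exists_four_chars (l.drop (i - 3)) hlen4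
        have hseg : (l.take (i + 1)).drop (i - 3) = [a, b, c0, d] := by
          rw [List.drop_take, hwin]
          have : i + 1 - (i - 3) = 4 := by omega
          rw [this]; rfl
        have hcond := findStartSq_len l (i - 3) a b c0 d rest2 hwin
        rw [hm] at hcond
        rw [hcond]
        by_cases hAc : (a != b && a != c0 && a != d && b != c0 && b != d && c0 != d) = true
        · have hnodupw : ((l.take (i + 1)).drop (i - 3)).Nodup := by
            rw [hseg]; exact (pairwise_iff_nodup a b c0 d).mp hAc
          have hle : start ≤ i - 3 := by
            by_contra hlt
            exact hmin' (i - 3) (by omega) hnodupw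
          rw [if_pos hAc, if_pos (by omega)]
        · have hgt : ¬ ((i : Int) - ((start : Nat) : Int) ≥ 3) := by
            intro hge
            have : start ≤ i - 3 := by omega
            have := nodup_drop_mono (l.take (i + 1)) start (i - 3) this hnd'
            rw [hseg] at this
            exact hAc ((pairwise_iff_nodup a b c0 d).mpr this)
          rw [if_neg hAc, if_neg hgt]
          exact ih (i + 1) _ start (by rw [← List.drop_drop, hdrop]; rfl) (by omega)
            hlastInv' hnd' hmin'

-- ===== VERDICT (by name: the statement is the Claim_ definition above) =====
theorem findStart_spec : Claim_equal_findStart := by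
  intro code _
  unfold Spec_findStart findStart findStart_alt
  exact goA_eq_goB code.toList code.toList 0 PySem.Dict.empty 0 rfl (le_refl 0)
    (fun c => by simp [PySem.Dict.getD_empty, lastIdx]) (by simp) (fun s hs => absurd hs (by omega))
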